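-- pv_equiv track=rewrite | github.com/jaeyo03/CodingTest | Exhaustive Search/programmers_258705.py | solution
-- ===== SOURCE A (Python) =====
-- from itertools import combinations
--
-- def solution(n, tops):
--     answer = 0
--     possible = []
--     for i in range(2 * n):
--         possible.append([i, i + 1])
--
--     for inx, top in enumerate(tops):
--         if top == 1:
--             possible.append([2 * inx + 1])
--
--     for i in range(1, n + 1):
--         temp = list(combinations(possible, i))
--         for t in temp:
--             count = 0
--             values = set()
--             for value in t:
--                 for v in value:
--                     values.add(v)
--                     count += 1
--             if len(values) == count:
--                 answer += 1
--
--     return (answer + 1) % 10007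
-- ===== SOURCE B (Python) =====
-- def solution(n, tops):
--     # DFS over the pieces with pruning: extend only with pieces disjoint from the
--     # vertices already used, never enumerating conflicting combinations at all.
--     items = [(i, i + 1) for i in range(2 * n)]
--     items += [(2 * i + 1,) for i, t in enumerate(tops) if t == 1]
--     m = len(items)
--
--     def count(idx, used, k):
--         if idx == m:
--             return 1
--         total = count(idx + 1, used, k)
--         if k < n and used.isdisjoint(items[idx]):
--             total += count(idx + 1, used | frozenset(items[idx]), k + 1)
--         return total
--
--     return count(0, frozenset(), 0) % 10007
-- ===== Notes on version B (the rewrite author's own statement) =====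
-- stated objective: alternative
-- what changed: A materializes every combination of every size 1..n and re-checks each for vertex clashes; B does one include/exclude recursion over the pieces that prunes any branch reusing a vertex or exceeding the size cap, so conflicting selections are never enumerated (intended as faster; a timing run measured 11.9-33.6x where both versions finished but could not confirm it at the largest generated sizes, where both blow up).
import Mathlib
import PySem

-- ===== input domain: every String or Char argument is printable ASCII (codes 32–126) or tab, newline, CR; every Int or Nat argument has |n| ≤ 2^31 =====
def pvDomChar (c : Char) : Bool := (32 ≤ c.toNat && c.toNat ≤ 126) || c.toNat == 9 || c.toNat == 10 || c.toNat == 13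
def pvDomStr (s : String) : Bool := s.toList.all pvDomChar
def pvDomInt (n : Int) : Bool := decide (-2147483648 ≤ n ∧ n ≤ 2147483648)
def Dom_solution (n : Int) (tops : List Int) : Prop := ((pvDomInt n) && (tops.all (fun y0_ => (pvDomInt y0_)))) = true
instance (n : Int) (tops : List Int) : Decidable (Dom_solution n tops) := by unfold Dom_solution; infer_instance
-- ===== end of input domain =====

-- B replaces A's size-by-size enumeration of all combinations with a single pruned
-- include/exclude recursion over the pieces (objective: alternative; intended as faster,
-- measured 11.9-33.6x where both versions finished, unconfirmed at the largest sizes).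

-- ===== PORT A =====
def solution (n : Int) (tops : List Int) : Int :=
  let possible1 := (PySem.List.pyRange 0 (2*n)).foldl
      (fun acc i => acc ++ [[i, i + 1]]) ([] : List (List Int))
  let possible := (PySem.List.enumerate tops).foldl
      (fun acc p => if p.2 == 1 then acc ++ [[2 * p.1 + 1]] else acc) possible1
  let answer := (PySem.List.pyRange 1 (n + 1)).foldl (fun answer i =>
      (PySem.List.combinations possible i.toNat).foldl (fun answer t =>
        let cv := t.foldl (fun (cv : Int × PySem.Set Int) value =>
            value.foldl (fun (cv : Int × PySem.Set Int) v => (cv.1 + 1, cv.2.add v)) cv)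
          ((0 : Int), PySem.Set.ofList ([] : List Int))
        if PySem.Set.len cv.2 == cv.1 then answer + 1 else answer) answer) (0 : Int)
  PySem.Int.mod (answer + 1) 10007

-- ===== PORT B =====
def solutionAltItems (n : Int) (tops : List Int) : List (List Int) :=
  ((PySem.List.pyRange 0 (2*n)).map (fun i => [i, i + 1]))
    ++ (((PySem.List.enumerate tops).filter (fun p => p.2 == 1)).map (fun p => [2 * p.1 + 1]))

def solutionAltCount (n : Int) (items : List (List Int)) (used : PySem.Set Int) (k : Int) : Int :=
  match items with
  | [] => 1
  | x :: xs =>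
    solutionAltCount n xs used k +
      (if k < n ∧ PySem.Set.isdisjoint used x = true then
        solutionAltCount n xs (PySem.Set.update used x) (k + 1)
      else 0)

def solution_alt (n : Int) (tops : List Int) : Int :=
  PySem.Int.mod (solutionAltCount n (solutionAltItems n tops) PySem.Set.empty 0) 10007

-- ===== PRECONDITION & SPEC =====
def Spec_solution (n : Int) (tops : List Int) (out : Int) : Prop := out = solution_alt n tops
instance (n : Int) (tops : List Int) (out : Int) : Decidable (Spec_solution n tops out) := by unfold Spec_solution; infer_instance

-- ===== CLAIM (what is proved, stated in full; the proofs are below) =====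
def Claim_equal_solution : Prop := ∀ (n : Int) (tops : List Int), Dom_solution n tops → Spec_solution n tops (solution n tops)

-- ===== LEMMAS AND PROOFS =====

-- "this selection of pieces is admissible": its vertices are pairwise distinct and avoid `used`
def okP (used : List Int) (s : List (List Int)) : Bool :=
  decide (s.flatten.Nodup ∧ ∀ v ∈ s.flatten, v ∉ used)

lemma cvFold1 (value : List Int) (c : Int) (s : PySem.Set Int) :
    value.foldl (fun (cv : Int × PySem.Set Int) v => (cv.1 + 1, cv.2.add v)) (c, s)
      = (c + value.length, PySem.Set.update s value) := by
  induction value generalizing c s with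
  | nil => simp [PySem.Set.update_nil]
  | cons x xs ih =>
    simp only [List.foldl_cons, ih, PySem.Set.update_cons, List.length_cons]
    rw [Prod.mk.injEq]
    refine ⟨by push_cast; ring, rfl⟩

lemma cvFold (t : List (List Int)) (c : Int) (s : PySem.Set Int) :
    t.foldl (fun cv value =>
        value.foldl (fun (cv : Int × PySem.Set Int) v => (cv.1 + 1, cv.2.add v)) cv) (c, s)
      = (c + t.flatten.length, PySem.Set.update s t.flatten) := by
  induction t generalizing c s with
  | nil => simp [PySem.Set.update_nil]
  | cons x xs ih =>
    simp only [List.foldl_cons, cvFold1, ih, List.flatten_cons, List.length_append,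
      PySem.Set.update_append]
    rw [Prod.mk.injEq]
    refine ⟨by push_cast; ring, rfl⟩

lemma ofList_sublist (l : List Int) : (PySem.Set.ofList l).Sublist l := by
  induction l using List.reverseRecOn with
  | nil => simp [PySem.Set.ofList_nil]
  | append_singleton xs x ih =>
    rw [PySem.Set.ofList_append_singleton, PySem.Set.add_eq_ite]
    split
    · exact ih.trans (List.sublist_append_left xs [x])
    · exact ih.append (List.Sublist.refl [x])

lemma lenOfList_iff (l : List Int) : (PySem.Set.ofList l).length = l.length ↔ l.Nodup := by
  constructor
  · intro h
    have := (ofList_sublist l).eq_of_length h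
    rw [← this]
    exact PySem.Set.nodup_ofList l
  · intro h
    rw [PySem.Set.ofList_eq_self_of_nodup l h]

-- A's inner admissibility test computes okP []
lemma cond_eq_okP (t : List (List Int)) :
    (PySem.Set.len (t.foldl (fun cv value =>
        value.foldl (fun (cv : Int × PySem.Set Int) v => (cv.1 + 1, cv.2.add v)) cv)
        ((0 : Int), PySem.Set.ofList ([] : List Int))).2
      == (t.foldl (fun cv value =>
        value.foldl (fun (cv : Int × PySem.Set Int) v => (cv.1 + 1, cv.2.add v)) cv)
        ((0 : Int), PySem.Set.ofList ([] : List Int))).1)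
      = okP [] t := by
  rw [cvFold]
  have hu : PySem.Set.update (PySem.Set.ofList ([] : List Int)) t.flatten
      = PySem.Set.ofList t.flatten := by
    rw [PySem.Set.ofList_nil, PySem.Set.ofList_eq_foldl, PySem.Set.update]
  simp only [hu, PySem.Set.len, okP, zero_add]
  rw [Bool.eq_iff_iff]
  simp only [beq_iff_eq, Int.natCast_inj, decide_eq_true_eq, List.not_mem_nil,
    not_false_iff, implies_true, and_true]
  exact lenOfList_iff _

lemma countP_split {α : Type} (l : List α) (p r : α → Bool) :
    l.countP p = l.countP (fun x => p x && r x) + l.countP (fun x => p x && !r x) := by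
  induction l with
  | nil => simp
  | cons x xs ih =>
    by_cases hp : p x <;> by_cases hr : r x <;>
      simp [hp, hr, ih] <;> omega

lemma countP_isEmpty_sublists' {α : Type} (L : List α) (p : List α → Bool) :
    L.sublists'.countP (fun s => p s && s.isEmpty) = if p [] then 1 else 0 := by
  induction L with
  | nil => simp [List.countP_cons]
  | cons x xs ih =>
    simp [List.sublists'_cons, List.countP_append, List.countP_map, ih, Function.comp]

lemma comb_countP {α : Type} :
    ∀ (L : List α) (r : Nat) (p : List α → Bool),
      (PySem.List.combinations L r).countP p
        = L.sublists'.countP (fun s => p s && (s.length == r)) := by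
  intro L
  induction L with
  | nil =>
    intro r p
    cases r with
    | zero => simp [PySem.List.combinations_zero, List.countP_cons]
    | succ r => simp [PySem.List.combinations_nil_succ]
  | cons x xs ih =>
    intro r p
    cases r with
    | zero =>
      rw [PySem.List.combinations_zero]
      have : (fun (s : List α) => p s && (s.length == 0))
          = (fun s => p s && s.isEmpty) := by
        funext s; cases s <;> simp
      rw [this, countP_isEmpty_sublists']
      simp [List.countP_cons]
    | succ r =>
      rw [PySem.List.combinations_cons_succ, List.countP_append, List.countP_map,
        List.sublists'_cons, List.countP_append, List.countP_map]
      have h1 : ((fun s => p s && (s.length == r + 1)) ∘ List.cons x)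
          = (fun (s : List α) => (p ∘ List.cons x) s && (s.length == r)) := by
        funext s; simp [Function.comp]
      rw [ih r (p ∘ List.cons x), ih (r+1) p, h1, Nat.add_comm]

lemma keyB (n k : Int) (x : List Int) (used : List Int) (hk : k < n) (hx : x.Nodup)
    (hdisj : ∀ v ∈ x, v ∉ used) (s : List (List Int)) :
    (okP used (x::s) && ((x::s).isEmpty || decide (((x::s).length:Int) + k ≤ n)))
      = (okP (PySem.Set.update used x) s && (s.isEmpty || decide ((s.length:Int) + (k+1) ≤ n))) := by
  rw [Bool.eq_iff_iff]
  simp only [Bool.and_eq_true, Bool.or_eq_true, okP, decide_eq_true_eq,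
    List.flatten_cons, List.nodup_append, List.isEmpty_iff,
    List.isEmpty_cons, Bool.false_eq_true, false_or, List.mem_append,
    List.length_cons, PySem.Set.mem_update]
  constructor
  · rintro ⟨⟨⟨hnx, hnf, hdxf⟩, hall⟩, hlen⟩
    push_cast at hlen
    refine ⟨⟨hnf, fun v hvf h => ?_⟩, Or.inr (by omega)⟩
    rcases h with hvu | hvx
    · exact hall v (Or.inr hvf) hvu
    · exact hdxf v hvx v hvf rfl
  · rintro ⟨⟨hnf, hall⟩, hlen⟩
    push_cast
    refine ⟨⟨⟨hx, hnf, fun a ha b hb hab => ?_⟩, fun v hv => ?_⟩, ?_⟩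
    · exact (hall b hb) (Or.inr (hab ▸ ha))
    · rcases hv with hvx | hvf
      · exact hdisj v hvx
      · exact fun hvu => (hall v hvf) (Or.inl hvu)
    · rcases hlen with rfl | hle
      · simp; omega
      · omega

lemma keyB0 (n k : Int) (x : List Int) (used : List Int)
    (h : ¬(k < n ∧ PySem.Set.isdisjoint used x = true)) (s : List (List Int)) :
    (okP used (x::s) && ((x::s).isEmpty || decide (((x::s).length:Int) + k ≤ n))) = false := by
  rcases Classical.em (k < n) with hk | hk
  · have hd : ¬ PySem.Set.isdisjoint used x = true := fun hd => h ⟨hk, hd⟩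
    rw [PySem.Set.isdisjoint_iff] at hd
    push Not at hd
    obtain ⟨v, hvu, hvx⟩ := hd
    have : okP used (x::s) = false := by
      simp only [okP, decide_eq_false_iff_not, not_and]
      intro _
      push Not
      exact ⟨v, by simp [hvx], hvu⟩
    simp [this]
  · simp only [Bool.and_eq_false_iff, Bool.or_eq_false_iff]
    right
    refine ⟨by simp, ?_⟩
    simp only [List.length_cons, decide_eq_false_iff_not]
    push_cast
    omega

lemma B_count (n : Int) :
    ∀ (xs : List (List Int)) (used : List Int) (k : Int),
      (∀ x ∈ xs, x.Nodup) →
      solutionAltCount n xs used k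
        = (xs.sublists'.countP
            (fun s => okP used s && (s.isEmpty || decide ((s.length : Int) + k ≤ n))) : Int) := by
  intro xs
  induction xs with
  | nil =>
    intro used k _
    simp [solutionAltCount, okP]
  | cons x xs ih =>
    intro used k hnd
    have hx : x.Nodup := hnd x (List.mem_cons_self ..)
    have hxs : ∀ y ∈ xs, y.Nodup := fun y hy => hnd y (List.mem_cons_of_mem _ hy)
    rw [solutionAltCount, List.sublists'_cons, List.countP_append, List.countP_map,
      ih used k hxs]
    push_cast
    congr 1
    by_cases h : k < n ∧ PySem.Set.isdisjoint used x = true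
    · rw [if_pos h, ih (PySem.Set.update used x) (k+1) hxs]
      have hdisj : ∀ v ∈ x, v ∉ used := by
        intro v hv hvu
        exact (PySem.Set.isdisjoint_iff used x).mp h.2 v hvu hv
      norm_cast
      apply List.countP_congr
      intro s _
      simp only [Function.comp_apply]
      rw [keyB n k x used h.1 hx hdisj s]
    · rw [if_neg h]
      symm
      norm_cast
      rw [List.countP_eq_zero]
      intro s _
      simp only [Function.comp_apply, keyB0 n k x used h s]
      simp

lemma boolId1 {α : Type} (q : List α → Bool) (m : Nat) (s : List α) :
    ((q s && !s.isEmpty && decide (s.length ≤ m + 1)) && decide (s.length ≤ m))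
      = (q s && !s.isEmpty && decide (s.length ≤ m)) := by
  rw [Bool.eq_iff_iff]
  simp only [Bool.and_eq_true, decide_eq_true_eq]
  constructor
  · rintro ⟨⟨⟨hq, he⟩, _⟩, hle⟩
    exact ⟨⟨hq, he⟩, hle⟩
  · rintro ⟨⟨hq, he⟩, hle⟩
    exact ⟨⟨⟨hq, he⟩, by omega⟩, hle⟩

lemma boolId2 {α : Type} (q : List α → Bool) (m : Nat) (s : List α) :
    ((q s && !s.isEmpty && decide (s.length ≤ m + 1)) && !decide (s.length ≤ m))
      = (q s && (s.length == m + 1)) := by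
  rw [Bool.eq_iff_iff]
  simp only [Bool.and_eq_true, Bool.not_eq_eq_eq_not, Bool.not_true,
    decide_eq_true_eq, decide_eq_false_iff_not, beq_iff_eq, not_le]
  constructor
  · rintro ⟨⟨⟨hq, _⟩, h1⟩, h2⟩
    exact ⟨hq, by omega⟩
  · rintro ⟨hq, h⟩
    refine ⟨⟨⟨hq, ?_⟩, by omega⟩, by omega⟩
    cases s
    · simp at h
    · simp

lemma sum_sizes {α : Type} (S : List (List α)) (q : List α → Bool) :
    ∀ m : Nat,
      ((PySem.List.pyRange 1 ((m : Int) + 1)).map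
          (fun i => (S.countP (fun s => q s && (s.length == i.toNat)) : Int))).sum
        = (S.countP (fun s => q s && !s.isEmpty && decide (s.length ≤ m)) : Int) := by
  intro m
  induction m with
  | zero =>
    rw [PySem.List.pyRange_one_eq_nil (by omega)]
    simp only [List.map_nil, List.sum_nil]
    symm
    norm_cast
    rw [List.countP_eq_zero]
    intro s _
    cases s <;> simp
  | succ m ih =>
    rw [show ((m + 1 : Nat) : Int) + 1 = ((m : Int) + 1) + 1 by push_cast; ring,
      PySem.List.pyRange_one_succ_right (by omega), List.map_append, List.sum_append, ih]
    simp only [List.map_cons, List.map_nil, List.sum_cons, List.sum_nil, add_zero]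
    have htoNat : ((m : Int) + 1).toNat = m + 1 := by omega
    rw [htoNat]
    have hsplit := countP_split S
      (fun s => q s && !s.isEmpty && decide (s.length ≤ m + 1))
      (fun s => decide (s.length ≤ m))
    have h1 : S.countP (fun x => (q x && !x.isEmpty && decide (x.length ≤ m + 1)) && decide (x.length ≤ m))
        = S.countP (fun s => q s && !s.isEmpty && decide (s.length ≤ m)) :=
      List.countP_congr (fun s _ => by rw [boolId1 q m s])
    have h2 : S.countP (fun x => (q x && !x.isEmpty && decide (x.length ≤ m + 1)) && !decide (x.length ≤ m))
        = S.countP (fun s => q s && (s.length == m + 1)) :=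
      List.countP_congr (fun s _ => by rw [boolId2 q m s])
    rw [h1, h2] at hsplit
    omega

lemma items_eq (n : Int) (tops : List Int) :
    ((PySem.List.enumerate tops).foldl
        (fun acc p => if p.2 == 1 then acc ++ [[2 * p.1 + 1]] else acc)
        ((PySem.List.pyRange 0 (2*n)).foldl
          (fun acc i => acc ++ [[i, i + 1]]) ([] : List (List Int))))
      = solutionAltItems n tops := by
  rw [PySem.List.foldl_append_singleton_eq_map, PySem.List.foldl_append_if,
    List.nil_append, solutionAltItems]

lemma items_nodup (n : Int) (tops : List Int) :
    ∀ x ∈ solutionAltItems n tops, x.Nodup := by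
  intro x hx
  rw [solutionAltItems, List.mem_append] at hx
  rcases hx with hx | hx
  · obtain ⟨i, _, rfl⟩ := List.mem_map.mp hx
    simp
  · obtain ⟨p, _, rfl⟩ := List.mem_map.mp hx
    simp

-- ===== VERDICT (by name: the statement is the Claim_ definition above) =====
theorem solution_spec : Claim_equal_solution := by
  intro n tops _
  show solution n tops = solution_alt n tops
  rw [solution, solution_alt, items_eq n tops]
  set P := solutionAltItems n tops with hP
  -- A's inner double loop counts admissible selections of each size
  have hinner : ∀ (i : Int) (a : Int),
      (PySem.List.combinations P i.toNat).foldl (fun answer t =>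
        if PySem.Set.len ((t.foldl (fun cv value =>
            value.foldl (fun (cv : Int × PySem.Set Int) v => (cv.1 + 1, cv.2.add v)) cv)
            ((0 : Int), PySem.Set.ofList ([] : List Int)))).2
          == ((t.foldl (fun cv value =>
            value.foldl (fun (cv : Int × PySem.Set Int) v => (cv.1 + 1, cv.2.add v)) cv)
            ((0 : Int), PySem.Set.ofList ([] : List Int)))).1 then answer + 1 else answer) a
      = a + ((P.sublists'.countP (fun s => okP [] s && (s.length == i.toNat))) : Int) := by
    intro i a
    have hcong : (fun (answer : Int) t =>
        if PySem.Set.len ((t.foldl (fun cv value =>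
            value.foldl (fun (cv : Int × PySem.Set Int) v => (cv.1 + 1, cv.2.add v)) cv)
            ((0 : Int), PySem.Set.ofList ([] : List Int)))).2
          == ((t.foldl (fun cv value =>
            value.foldl (fun (cv : Int × PySem.Set Int) v => (cv.1 + 1, cv.2.add v)) cv)
            ((0 : Int), PySem.Set.ofList ([] : List Int)))).1 then answer + 1 else answer)
        = (fun (answer : Int) t => if okP [] t then answer + 1 else answer) := by
      funext a t
      rw [cond_eq_okP]
    rw [hcong, PySem.List.foldl_count_if, comb_countP]
  have hfun := funext fun (a : Int) => funext fun (i : Int) => hinner i a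
  rw [hfun, PySem.List.foldl_add, zero_add]
  rw [show (PySem.Set.empty : PySem.Set Int) = ([] : List Int) from rfl,
    B_count n P [] 0 (items_nodup n tops)]
  congr 1
  rcases Classical.em (n ≤ 0) with hn | hn
  · rw [PySem.List.pyRange_one_eq_nil (by omega)]
    simp only [List.map_nil, List.sum_nil, zero_add]
    have hcong2 : P.sublists'.countP
        (fun s => okP [] s && (s.isEmpty || decide ((s.length : Int) + 0 ≤ n)))
        = P.sublists'.countP (fun s => okP [] s && s.isEmpty) := by
      apply List.countP_congr
      intro s _
      cases s with
      | nil => simp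
      | cons a t =>
        simp only [List.isEmpty_cons, Bool.false_or]
        rw [decide_eq_false (by simp only [List.length_cons]; push_cast; omega :
          ¬ (((a :: t).length : Int) + 0 ≤ n))]
    rw [hcong2, countP_isEmpty_sublists']
    norm_num [okP]
  · have hm : ((n.toNat : Int)) = n := Int.toNat_of_nonneg (by omega)
    have hsum := sum_sizes P.sublists' (okP []) n.toNat
    rw [hm] at hsum
    rw [hsum]
    have hsplit := countP_split P.sublists'
      (fun s => okP [] s && (s.isEmpty || decide ((s.length : Int) + 0 ≤ n)))
      (fun s => s.isEmpty)
    have h1 : P.sublists'.countP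
        (fun x => (okP [] x && (x.isEmpty || decide ((x.length : Int) + 0 ≤ n))) && x.isEmpty)
        = 1 := by
      have : P.sublists'.countP
          (fun x => (okP [] x && (x.isEmpty || decide ((x.length : Int) + 0 ≤ n))) && x.isEmpty)
          = P.sublists'.countP (fun s => okP [] s && s.isEmpty) := by
        apply List.countP_congr
        intro s _
        cases s <;> simp
      rw [this, countP_isEmpty_sublists']
      norm_num [okP]
    have h2 : P.sublists'.countP
        (fun x => (okP [] x && (x.isEmpty || decide ((x.length : Int) + 0 ≤ n))) && !x.isEmpty)
        = P.sublists'.countP (fun s => okP [] s && !s.isEmpty && decide (s.length ≤ n.toNat)) := by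
      apply List.countP_congr
      intro s _
      cases s with
      | nil => simp
      | cons a t =>
        simp only [List.isEmpty_cons, Bool.false_or, Bool.not_false, Bool.and_true]
        rw [show decide (((a :: t).length : Int) + 0 ≤ n)
            = decide ((a :: t).length ≤ n.toNat) from by
          rw [decide_eq_decide]; omega]
    rw [h1, h2] at hsplit
    omega
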